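-- pv_equiv track=rewrite | github.com/brownbreeze/StudyCodingTest | programmers/2_디펜스_게임/source_20230216.py | solution
-- ===== SOURCE A (Python) =====
-- def solution(n, k, enemy):
--     answer = 0
--     nmg_k = k
--     for i in range(k, len(enemy)):
--         if sum(sorted(enemy[:i])[:-k])>n:
--             return i-1
--     else:
--         return k
--     return answer
-- ===== SOURCE B (Python) =====
-- def solution(n, k, enemy):
--     # One pass: keep `top`, the k largest enemies seen so far (ascending),
--     # and `taken`, the damage absorbed so far (everything not in `top`).
--     top = []
--     taken = 0
--     i = 0
--     for e in enemy:
--         if i >= k and taken > n: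
--             return i - 1
--         if len(top) < k:
--             top = _insert(top, e)
--         elif top and e > top[0]:
--             taken += top[0]
--             top = _insert(top[1:], e)
--         else:
--             taken += e
--         i += 1
--     return k
--
--
-- def _insert(xs, e):
--     # insert e into ascending xs, after any equal elements
--     for j in range(len(xs)):
--         if e < xs[j]:
--             return xs[:j] + [e] + xs[j:]
--     return xs + [e]
-- ===== Notes on version B (the rewrite author's own statement) =====
-- stated objective: faster
-- what changed: Instead of re-sorting every prefix and summing all but its k largest elements (A), B makes a single pass that maintains the k largest enemies seen so far in a small sorted buffer and a running sum of the damage absorbed, so no prefix is ever re-sorted.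
-- outside the precondition, e.g. on solution(2, 0, [1, 1, 1, 1]): A returns 0, B returns 2
import Mathlib
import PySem

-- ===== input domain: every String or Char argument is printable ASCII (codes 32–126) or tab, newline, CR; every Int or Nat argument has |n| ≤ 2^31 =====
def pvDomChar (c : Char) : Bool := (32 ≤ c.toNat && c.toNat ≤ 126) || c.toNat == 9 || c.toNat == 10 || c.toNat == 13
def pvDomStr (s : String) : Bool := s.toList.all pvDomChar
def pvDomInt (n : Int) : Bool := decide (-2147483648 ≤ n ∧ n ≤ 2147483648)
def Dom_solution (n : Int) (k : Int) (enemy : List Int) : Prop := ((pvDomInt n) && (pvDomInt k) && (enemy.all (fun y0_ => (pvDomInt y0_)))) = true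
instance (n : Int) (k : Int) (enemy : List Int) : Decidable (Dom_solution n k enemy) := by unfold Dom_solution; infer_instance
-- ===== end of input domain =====

-- B replaces A's re-sort of every prefix by one pass that maintains the k largest
-- enemies seen so far plus a running sum of absorbed damage (objective: faster).

-- ===== PORT A =====
-- the for-loop with early return; Python's for-else: an exhausted loop returns k
def solutionLoop (n : Int) (k : Int) (enemy : List Int) : List Int → Int
  | [] => k
  | i :: rest =>
    if (PySem.List.slice
          (PySem.List.sorted (PySem.List.slice enemy none (some i)) (fun x => x) false)
          none (some (-k))).sum > n
    then i - 1
    else solutionLoop n k enemy rest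

def solution (n : Int) (k : Int) (enemy : List Int) : Int :=
  solutionLoop n k enemy (PySem.List.pyRange k (enemy.length : Int) 1)

-- ===== PORT B =====
-- _insert: insert e into the ascending list xs, after any equal elements
def altInsert : List Int → Int → List Int
  | [], e => [e]
  | x :: t, e => if e < x then e :: x :: t else x :: altInsert t e

-- the single pass: i = index, top = the k largest so far (ascending), taken = damage absorbed
def altLoop (n : Int) (k : Int) (i : Int) (top : List Int) (taken : Int) : List Int → Int
  | [] => k
  | e :: rest =>
    if i ≥ k ∧ taken > n then i - 1
    else if (top.length : Int) < k then altLoop n k (i + 1) (altInsert top e) taken rest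
    else
      match top with
      | [] => altLoop n k (i + 1) [] (taken + e) rest
      | t0 :: tt =>
        if e > t0 then altLoop n k (i + 1) (altInsert tt e) (taken + t0) rest
        else altLoop n k (i + 1) (t0 :: tt) (taken + e) rest

def solution_alt (n : Int) (k : Int) (enemy : List Int) : Int :=
  altLoop n k 0 [] 0 enemy

-- ===== PRECONDITION & SPEC =====
-- Pre_ restricts to the problem's natural domain k ≥ 1 (at least one skip available):
-- for k ≤ 0 A still returns, but its value rests on Python's negative-slice accident
-- that enemy[:-k] is empty (k = 0) or a smallest-|k| prefix (k < 0), which B does not reproduce.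
def Pre_solution (n : Int) (k : Int) (enemy : List Int) : Prop := 1 ≤ k
instance (n : Int) (k : Int) (enemy : List Int) : Decidable (Pre_solution n k enemy) := by
  unfold Pre_solution; infer_instance

def pvWitness_solution : Int × Int × List Int := (7, 2, [4, 2, 4, 8, 1])

def Spec_solution (n : Int) (k : Int) (enemy : List Int) (out : Int) : Prop := out = solution_alt n k enemy
instance (n : Int) (k : Int) (enemy : List Int) (out : Int) : Decidable (Spec_solution n k enemy out) := by unfold Spec_solution; infer_instance

-- ===== CLAIM (what is proved, stated in full; the proofs are below) =====
def Claim_equal_solution : Prop := ∀ (n : Int) (k : Int) (enemy : List Int), Dom_solution n k enemy → Pre_solution n k enemy → Spec_solution n k enemy (solution n k enemy)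

-- ===== LEMMAS AND PROOFS =====

-- loop invariant: `disc` is the multiset of enemies already absorbed, `top` the k
-- (or, early on, all) largest of the processed prefix p, kept in ascending order
def altInv (k' : Nat) (p top : List Int) (taken : Int) : Prop :=
  ∃ disc : List Int,
    p.Perm (disc ++ top) ∧
    top.Pairwise (· ≤ ·) ∧
    taken = disc.sum ∧
    top.length = min p.length k' ∧
    (∀ d ∈ disc, ∀ t ∈ top, d ≤ t)

theorem altInsert_perm (xs : List Int) (e : Int) : (altInsert xs e).Perm (e :: xs) := by
  induction xs with
  | nil => simp [altInsert]
  | cons x t ih =>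
    simp only [altInsert]
    split
    · exact List.Perm.refl _
    · exact (ih.cons x).trans (List.Perm.swap e x t)

theorem altInsert_length (xs : List Int) (e : Int) :
    (altInsert xs e).length = xs.length + 1 := by
  simpa using (altInsert_perm xs e).length_eq

theorem mem_altInsert {y : Int} (xs : List Int) (e : Int) :
    y ∈ altInsert xs e ↔ y = e ∨ y ∈ xs := by
  rw [(altInsert_perm xs e).mem_iff]; simp

theorem altInsert_pairwise {xs : List Int} (e : Int) (h : xs.Pairwise (· ≤ ·)) :
    (altInsert xs e).Pairwise (· ≤ ·) := by
  induction xs with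
  | nil => simp [altInsert]
  | cons x t ih =>
    rcases List.pairwise_cons.mp h with ⟨hx, ht⟩
    simp only [altInsert]
    split
    · rename_i hlt
      refine List.pairwise_cons.mpr ⟨?_, h⟩
      intro b hb
      rcases List.mem_cons.mp hb with rfl | hb
      · exact le_of_lt hlt
      · exact le_trans (le_of_lt hlt) (hx _ hb)
    · rename_i hge
      refine List.pairwise_cons.mpr ⟨?_, ih ht⟩
      intro b hb
      rcases (mem_altInsert t e).mp hb with rfl | hb
      · omega
      · exact hx _ hb

-- A's tested quantity at prefix length |p| equals B's running `taken`
theorem condA_sum (k' : Nat) (p top disc : List Int)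
    (hperm : p.Perm (disc ++ top)) (hsort : top.Pairwise (· ≤ ·))
    (hcross : ∀ d ∈ disc, ∀ t ∈ top, d ≤ t)
    (hlen : disc.length = p.length - k') (hk : k' ≤ p.length) :
    (List.take (p.length - k') (PySem.List.sorted p (fun x => x) false)).sum = disc.sum := by
  have hdec : (PySem.List.sorted p (fun x => x) false)
      = PySem.List.sorted disc (fun x => x) false ++ top := by
    apply PySem.List.sorted_id_eq_of_perm_of_pairwise
    · exact ((PySem.List.sorted_perm disc (fun x => x) false).append_right top).trans hperm.symm
    · rw [List.pairwise_append]
      refine ⟨PySem.List.sorted_pairwise disc (fun x => x), hsort, ?_⟩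
      intro d hd t ht
      exact hcross d ((PySem.List.sorted_perm disc (fun x => x) false).mem_iff.mp hd) t ht
  have hdl : (PySem.List.sorted disc (fun x => x) false).length = p.length - k' := by
    rw [(PySem.List.sorted_perm disc (fun x => x) false).length_eq]; exact hlen
  rw [hdec, List.take_left' hdl]
  exact (PySem.List.sorted_perm disc (fun x => x) false).sum_eq

-- the main simulation: B's loop with a valid state = A's loop over the remaining range
theorem loop_sim (n k : Int) (hk : 1 ≤ k) :
    ∀ (rest p top : List Int) (taken : Int),
      altInv k.toNat p top taken →
      altLoop n k (p.length : Int) top taken rest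
        = solutionLoop n k (p ++ rest)
            (PySem.List.pyRange (max (p.length : Int) k) ((p ++ rest).length : Int) 1) := by
  intro rest
  induction rest with
  | nil =>
    intro p top taken _
    rw [PySem.List.pyRange_one_eq_nil (by simp only [List.append_nil]; omega)]
    simp [altLoop, solutionLoop]
  | cons e rs ih =>
    intro p top taken hinv
    obtain ⟨disc, hperm, hsort, htaken, hlenTop, hcross⟩ := hinv
    have hlenD : disc.length = p.length - k.toNat := by
      have := hperm.length_eq
      rw [List.length_append] at this
      omega
    have hc1 : ((p ++ [e]).length : Int) = (p.length : Int) + 1 := by simp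
    by_cases hik : (p.length : Int) < k
    · -- prefix still shorter than k: B only inserts, A's range has not started
      have hDnil : disc = [] := by
        have : disc.length = 0 := by omega
        exact List.eq_nil_of_length_eq_zero this
      subst hDnil
      simp only [altLoop]
      rw [if_neg (by intro h; omega), if_pos (by omega)]
      have hinv' : altInv k.toNat (p ++ [e]) (altInsert top e) taken := by
        refine ⟨[], ?_, altInsert_pairwise e hsort, ?_, ?_, by simp⟩
        case refine_2 => simpa using htaken
        · have h1 : (p ++ [e]).Perm (e :: p) := List.perm_append_singleton e p
          have h2 : (e :: p).Perm (e :: top) := (show p.Perm top by simpa using hperm).cons e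
          simpa using (h1.trans h2).trans (altInsert_perm top e).symm
        · rw [altInsert_length]
          simp at hlenTop ⊢
          omega
      have step := ih (p ++ [e]) (altInsert top e) taken hinv'
      rw [hc1] at step
      have hm1 : max ((p.length : Int) + 1) k = k := by omega
      have hm2 : max (p.length : Int) k = k := by omega
      rw [hm1] at step
      rw [hm2]
      simpa using step
    · -- prefix length ≥ k: both sides test the same condition, in lockstep
      push_neg at hik
      have hm : max (p.length : Int) k = (p.length : Int) := by omega
      rw [hm]
      have hlt : (p.length : Int) < ((p ++ e :: rs).length : Int) := by simp
      rw [PySem.List.pyRange_one_cons hlt, solutionLoop]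
      -- A's condition reduces to `taken > n`
      have hslice1 : PySem.List.slice (p ++ e :: rs) none (some (p.length : Int)) = p := by
        rw [PySem.List.slice_to _ (by positivity)]
        simp
      have hkn : 0 < k.toNat := by omega
      have hklen : k.toNat ≤ p.length := by omega
      have hnegk : -k = -(k.toNat : Int) := by omega
      have hcond : (PySem.List.slice
            (PySem.List.sorted (PySem.List.slice (p ++ e :: rs) none (some (p.length : Int))) (fun x => x) false)
            none (some (-k))).sum = taken := by
        rw [hslice1, hnegk, PySem.List.slice_to_neg_natCast _ _ hkn,
            (PySem.List.sorted_perm p (fun x => x) false).length_eq]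
        rw [htaken]
        exact condA_sum k.toNat p top disc hperm hsort hcross hlenD hklen
      rw [hcond]
      by_cases hgt : taken > n
      · rw [if_pos hgt]
        simp only [altLoop]
        rw [if_pos ⟨by omega, hgt⟩]
      · rw [if_neg hgt]
        simp only [altLoop]
        rw [if_neg (by intro h; exact hgt h.2)]
        -- top has exactly k elements, so the insert branch is not taken
        have hlenTop' : top.length = k.toNat := by omega
        rw [if_neg (by rw [hlenTop']; omega)]
        -- top is nonempty
        obtain ⟨t0, tt, rfl⟩ : ∃ t0 tt, top = t0 :: tt := by
          cases top with
          | nil => exfalso; simp at hlenTop'; omega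
          | cons a b => exact ⟨a, b, rfl⟩
        dsimp only
        have htt : tt.Pairwise (· ≤ ·) := (List.pairwise_cons.mp hsort).2
        have ht0 : ∀ t ∈ tt, t0 ≤ t := (List.pairwise_cons.mp hsort).1
        by_cases he : e > t0
        · rw [if_pos he]
          have hinv' : altInv k.toNat (p ++ [e]) (altInsert tt e) (taken + t0) := by
            refine ⟨disc ++ [t0], ?_, altInsert_pairwise e htt, ?_, ?_, ?_⟩
            · have h1 : (p ++ [e]).Perm (e :: p) := List.perm_append_singleton e p
              have h2 : (e :: p).Perm (e :: (disc ++ t0 :: tt)) := hperm.cons e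
              have h3 : (e :: (disc ++ t0 :: tt)).Perm (disc ++ e :: t0 :: tt) :=
                List.perm_middle.symm
              have h4 : (disc ++ e :: t0 :: tt).Perm (disc ++ t0 :: e :: tt) :=
                ((List.Perm.swap t0 e tt)).append_left disc
              have h5 : (disc ++ t0 :: e :: tt).Perm ((disc ++ [t0]) ++ e :: tt) := by
                simp
              have h6 : ((disc ++ [t0]) ++ e :: tt).Perm ((disc ++ [t0]) ++ altInsert tt e) :=
                (altInsert_perm tt e).symm.append_left _
              exact ((((h1.trans h2).trans h3).trans h4).trans h5).trans h6
            · rw [List.sum_append]; simp [htaken]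
            · rw [altInsert_length]
              simp at hlenTop' ⊢
              omega
            · intro d hd t ht
              have ht' : t = e ∨ t ∈ tt := (mem_altInsert tt e).mp ht
              have hdt0 : d ≤ t0 := by
                rcases List.mem_append.mp hd with hd | hd
                · exact hcross d hd t0 (List.mem_cons_self)
                · simp at hd; omega
              rcases ht' with rfl | ht'
              · omega
              · exact le_trans hdt0 (ht0 t ht')
          have step := ih (p ++ [e]) (altInsert tt e) (taken + t0) hinv'
          rw [hc1] at step
          have hm1 : max ((p.length : Int) + 1) k = (p.length : Int) + 1 := by omega
          rw [hm1] at step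
          simpa using step
        · rw [if_neg he]
          have hinv' : altInv k.toNat (p ++ [e]) (t0 :: tt) (taken + e) := by
            refine ⟨disc ++ [e], ?_, hsort, ?_, ?_, ?_⟩
            · have h1 : (p ++ [e]).Perm (e :: p) := List.perm_append_singleton e p
              have h2 : (e :: p).Perm (e :: (disc ++ t0 :: tt)) := hperm.cons e
              have h3 : (e :: (disc ++ t0 :: tt)).Perm (disc ++ e :: t0 :: tt) :=
                List.perm_middle.symm
              have h5 : (disc ++ e :: t0 :: tt).Perm ((disc ++ [e]) ++ t0 :: tt) := by
                simp
              exact ((h1.trans h2).trans h3).trans h5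
            · rw [List.sum_append]; simp [htaken]
            · simp at hlenTop' ⊢; omega
            · intro d hd t ht
              rcases List.mem_append.mp hd with hd | hd
              · exact hcross d hd t ht
              · simp at hd
                subst hd
                rcases List.mem_cons.mp ht with rfl | ht'
                · omega
                · exact le_trans (by omega) (ht0 t ht')
          have step := ih (p ++ [e]) (t0 :: tt) (taken + e) hinv'
          rw [hc1] at step
          have hm1 : max ((p.length : Int) + 1) k = (p.length : Int) + 1 := by omega
          rw [hm1] at step
          simpa using step

-- ===== VERDICT (by name: the statement is the Claim_ definition above) =====
theorem solution_spec : Claim_equal_solution := by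
  intro n k enemy _ hk
  have hk' : 1 ≤ k := hk
  unfold Spec_solution solution solution_alt
  have h := loop_sim n k hk' enemy [] [] 0 ⟨[], by simp, by simp, by simp, by simp, by simp⟩
  simp only [List.length_nil, Nat.cast_zero, List.nil_append] at h
  rw [show (max (0:Int) k) = k from by omega] at h
  exact h.symm
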